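-- pv_equiv track=rewrite | github.com/kocopelly/nashville-folk-session | scripts/tta-build/tta-scraper.py | parse_abc_fields
-- ===== SOURCE A (Python) =====
-- def parse_abc_fields(abc_text):
--     """Extract key, meter, title from ABC header fields."""
--     fields = {}
--     for line in abc_text.split('\n'):
--         line = line.strip()
--         if len(line) >= 2 and line[1] == ':' and line[0].isalpha():
--             key = line[0]
--             val = line[2:].strip()
--             if key not in fields:  # first occurrence wins
--                 fields[key] = val
--     return fields
-- ===== SOURCE B (Python) =====
-- def parse_abc_fields(abc_text):
--     """Extract key, meter, title from ABC header fields."""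
--     lines = [line.strip() for line in abc_text.split('\n')]
--     pairs = [(s[0], s[2:].strip()) for s in lines
--              if len(s) >= 2 and s[1] == ':' and s[0].isalpha()]
--     return {k: next(v for k2, v in pairs if k2 == k)
--             for k in dict.fromkeys(k for k, _ in pairs)}
-- ===== Notes on version B (the rewrite author's own statement) =====
-- stated objective: alternative
-- what changed: B is staged: it extracts all valid (key, value) pairs with a comprehension, computes the distinct keys in first-appearance order with dict.fromkeys, and maps each key to the value of its first matching pair; A makes one forward pass inserting into a dict under a membership guard.
import Mathlib
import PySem

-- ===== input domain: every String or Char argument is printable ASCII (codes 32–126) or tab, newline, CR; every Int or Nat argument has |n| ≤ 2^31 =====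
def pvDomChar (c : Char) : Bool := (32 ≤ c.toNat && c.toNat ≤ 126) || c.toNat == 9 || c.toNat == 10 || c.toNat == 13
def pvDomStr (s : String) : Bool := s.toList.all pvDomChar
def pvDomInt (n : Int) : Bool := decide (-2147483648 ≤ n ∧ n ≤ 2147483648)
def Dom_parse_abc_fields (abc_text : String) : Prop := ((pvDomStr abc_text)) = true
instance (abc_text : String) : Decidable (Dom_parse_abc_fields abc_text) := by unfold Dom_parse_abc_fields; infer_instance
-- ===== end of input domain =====

-- B stages the work: extract all valid (key, value) pairs, take the distinct keys in
-- first-appearance order, and map each key to its first pair's value (objective: alternative).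

-- ===== PORT A =====
-- one loop step of A: strip the line, test it, insert only if the key is absent
def pvStepA (d : PySem.Dict String String) (line : List Char) : PySem.Dict String String :=
  let cs := PySem.Chars.strip line
  if 2 ≤ cs.length ∧ cs.getD 1 ' ' = ':' ∧ PySem.Chars.isalpha (cs.getD 0 ' ') = true then
    let key := String.ofList [cs.getD 0 ' ']
    let val := String.ofList (PySem.Chars.strip (cs.drop 2))
    if d.contains key then d else d.insert key val
  else d

def parse_abc_fields (abc_text : String) : List (String × String) :=
  ((PySem.Chars.splitOn abc_text.toList ['\n']).foldl pvStepA PySem.Dict.empty).items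

-- ===== PORT B =====
-- the pair comprehension's element: the (key, value) field of one stripped line, if valid
def pvLineField (line : List Char) : Option (String × String) :=
  let s := PySem.Chars.strip line
  if 2 ≤ s.length ∧ s.getD 1 ' ' = ':' ∧ PySem.Chars.isalpha (s.getD 0 ' ') = true then
    some (String.ofList [s.getD 0 ' '], String.ofList (PySem.Chars.strip (s.drop 2)))
  else none

-- next(v for k2, v in pairs if k2 == k); getD "" is a totality guard (the key always occurs)
def pvFirstVal (pairs : List (String × String)) (k : String) : String :=
  ((pairs.find? (fun p => p.1 == k)).map Prod.snd).getD ""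

def parse_abc_fields_alt (abc_text : String) : List (String × String) :=
  (PySem.List.dedup (((PySem.Chars.splitOn abc_text.toList ['\n']).filterMap pvLineField).map Prod.fst)).map
    (fun k => (k, pvFirstVal ((PySem.Chars.splitOn abc_text.toList ['\n']).filterMap pvLineField) k))

-- ===== PRECONDITION & SPEC =====
def Spec_parse_abc_fields (abc_text : String) (out : List (String × String)) : Prop := out = parse_abc_fields_alt abc_text
instance (abc_text : String) (out : List (String × String)) : Decidable (Spec_parse_abc_fields abc_text out) := by unfold Spec_parse_abc_fields; infer_instance

-- ===== CLAIM (what is proved, stated in full; the proofs are below) =====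
def Claim_equal_parse_abc_fields : Prop := ∀ (abc_text : String), Dom_parse_abc_fields abc_text → Spec_parse_abc_fields abc_text (parse_abc_fields abc_text)

-- ===== LEMMAS AND PROOFS =====

-- first occurrence of each key, head-recursively
def pvFirst : List (String × String) → List (String × String)
  | [] => []
  | (k, v) :: ps => (k, v) :: (pvFirst ps).filter (fun p => p.1 ≠ k)

-- first-occurrence dedup of the keys, head-recursively
def pvKeys : List String → List String
  | [] => []
  | k :: ks => k :: (pvKeys ks).filter (fun k' => k' ≠ k)

theorem pvKeys_cons (k : String) (ks : List String) :
    pvKeys (k :: ks) = k :: (pvKeys ks).filter (fun k' => k' ≠ k) := rfl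

theorem pvFirst_cons (k v : String) (ps : List (String × String)) :
    pvFirst ((k, v) :: ps) = (k, v) :: (pvFirst ps).filter (fun p => p.1 ≠ k) := rfl

-- PySem.List.dedup (a foldl of Set.add) agrees with the head recursion pvKeys
theorem pvFoldAdd (ks : List String) (acc : List String) :
    ks.foldl PySem.Set.add acc = acc ++ (pvKeys ks).filter (fun k => !acc.contains k) := by
  induction ks generalizing acc with
  | nil => simp [pvKeys]
  | cons k ks ih =>
    show (ks.foldl PySem.Set.add (PySem.Set.add acc k)) = _
    rw [ih, pvKeys_cons]
    by_cases hm : k ∈ acc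
    · have ha : PySem.Set.add acc k = acc := by
        simp [PySem.Set.add, PySem.Set.contains, hm]
      rw [ha, List.filter_cons]
      have hh : (!acc.contains k) = false := by simp [hm]
      simp only [hh, Bool.false_eq_true, if_false, List.filter_filter,
        List.append_cancel_left_eq]
      apply List.filter_congr
      intro k' _
      by_cases hk : k' = k
      · simp [hk, hm]
      · simp [hk]
    · have ha : PySem.Set.add acc k = acc ++ [k] := by
        simp [PySem.Set.add, PySem.Set.contains, hm]
      rw [ha, List.filter_cons]
      have hh : (!acc.contains k) = true := by simp [hm]
      simp only [hh, if_true, List.filter_filter, List.append_assoc,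
        List.singleton_append, List.append_cancel_left_eq, List.cons.injEq, true_and]
      apply List.filter_congr
      intro k' _
      by_cases hk : k' = k
      · simp [hk]
      · simp [hk]

theorem pvDedup_eq (ks : List String) : PySem.List.dedup ks = pvKeys ks := by
  have h := pvFoldAdd ks []
  simpa [PySem.List.dedup, PySem.Set.ofList, PySem.Set.empty] using h

-- B's staged computation produces exactly the first occurrences
theorem pvAlt_eq_first (ps : List (String × String)) :
    (pvKeys (ps.map Prod.fst)).map (fun k => (k, pvFirstVal ps k)) = pvFirst ps := by
  induction ps with
  | nil => simp [pvKeys, pvFirst]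
  | cons p ps ih =>
    obtain ⟨k, v⟩ := p
    rw [List.map_cons, pvKeys_cons, pvFirst_cons, List.map_cons]
    have hhead : pvFirstVal ((k, v) :: ps) k = v := by
      simp [pvFirstVal]
    rw [hhead, ← ih, List.filter_map]
    congr 1
    have hfil : ((pvKeys (ps.map Prod.fst)).filter (fun k' => k' ≠ k))
        = (pvKeys (ps.map Prod.fst)).filter
            ((fun p : String × String => decide (p.1 ≠ k)) ∘ (fun k' => (k', pvFirstVal ps k'))) := by
      apply List.filter_congr
      intro k' _; rfl
    rw [← hfil]
    apply List.map_congr_left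
    intro k' hk'
    have hne : k' ≠ k := by
      have := List.of_mem_filter hk'
      simpa using this
    have : pvFirstVal ((k, v) :: ps) k' = pvFirstVal ps k' := by
      have hbeq : (k == k') = false := by
        simp [beq_eq_false_iff_ne]
        exact fun h => hne h.symm
      simp [pvFirstVal, hbeq]
    simp [this]

-- A's loop over lines is a loop over the extracted pairs
def pvIns (d : PySem.Dict String String) (p : String × String) : PySem.Dict String String :=
  if d.contains p.1 then d else d.insert p.1 p.2

theorem pvStepA_eq (d : PySem.Dict String String) (line : List Char) :
    pvStepA d line = match pvLineField line with
      | some p => pvIns d p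
      | none => d := by
  show (if 2 ≤ (PySem.Chars.strip line).length ∧ (PySem.Chars.strip line).getD 1 ' ' = ':' ∧
          PySem.Chars.isalpha ((PySem.Chars.strip line).getD 0 ' ') = true then
        if d.contains (String.ofList [(PySem.Chars.strip line).getD 0 ' ']) = true then d
        else d.insert (String.ofList [(PySem.Chars.strip line).getD 0 ' '])
          (String.ofList (PySem.Chars.strip ((PySem.Chars.strip line).drop 2)))
      else d)
    = match (if 2 ≤ (PySem.Chars.strip line).length ∧ (PySem.Chars.strip line).getD 1 ' ' = ':' ∧
          PySem.Chars.isalpha ((PySem.Chars.strip line).getD 0 ' ') = true then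
        some (String.ofList [(PySem.Chars.strip line).getD 0 ' '],
          String.ofList (PySem.Chars.strip ((PySem.Chars.strip line).drop 2)))
      else none) with
      | some p => pvIns d p
      | none => d
  split_ifs with h hc
  · exact (if_pos hc).symm
  · exact (if_neg hc).symm
  · rfl

theorem pvA_pairs (lines : List (List Char)) (d : PySem.Dict String String) :
    lines.foldl pvStepA d = (lines.filterMap pvLineField).foldl pvIns d := by
  induction lines generalizing d with
  | nil => rfl
  | cons line rest ih =>
    show rest.foldl pvStepA (pvStepA d line) = _
    rw [ih, pvStepA_eq, List.filterMap_cons]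
    cases pvLineField line <;> rfl

-- loop invariant: A's insert-if-absent fold appends exactly the fresh first occurrences
theorem pvMain (ps : List (String × String)) (d : PySem.Dict String String) :
    (ps.foldl pvIns d).items = d.items ++ (pvFirst ps).filter (fun p => !(d.contains p.1)) := by
  induction ps generalizing d with
  | nil => simp [pvFirst]
  | cons p ps ih =>
    obtain ⟨key, val⟩ := p
    show ((ps.foldl pvIns (pvIns d (key, val))).items) = _
    rw [ih, pvFirst_cons, List.filter_cons]
    by_cases hc : d.contains key = true
    · have h1 : pvIns d (key, val) = d := by unfold pvIns; exact if_pos hc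
      rw [h1]
      have h2 : (!d.contains key) = false := by simp [hc]
      simp only [h2, Bool.false_eq_true, if_false, List.filter_filter,
        List.append_cancel_left_eq]
      apply List.filter_congr
      intro q _
      by_cases hpk : q.1 = key
      · simp [hpk, hc]
      · simp [hpk]
    · have h1 : pvIns d (key, val) = d.insert key val := by unfold pvIns; exact if_neg hc
      rw [h1, PySem.Dict.items_insert_of_not_contains _ _ (by simpa using hc)]
      have h2 : (!d.contains key) = true := by simp [hc]
      simp only [h2, if_true, List.filter_filter, List.append_assoc, List.singleton_append,
        List.append_cancel_left_eq, List.cons.injEq, true_and]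
      apply List.filter_congr
      intro q _
      by_cases hpk : q.1 = key
      · simp [hpk]
      · simp [hpk, PySem.Dict.contains_insert]

-- ===== VERDICT (by name: the statement is the Claim_ definition above) =====
theorem parse_abc_fields_spec : Claim_equal_parse_abc_fields := by
  intro abc_text _
  unfold Spec_parse_abc_fields parse_abc_fields parse_abc_fields_alt
  rw [pvA_pairs, pvMain, pvDedup_eq, pvAlt_eq_first]
  simp [PySem.Dict.empty]
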